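-- pv_equiv track=rewrite | github.com/ZimingDong/COMP202 | file_processing.py | get_word_breakdown
-- ===== SOURCE A (Python) =====
-- def get_sentences(text):
--     ''' (str) -> list
--     given a string returns a list of strings each representing one of the sentences from the input string.
--     >>> text1 = "No animal must ever kill any other animal. All animals are equal."
--     >>> get_sentences(text1)
--     ['No animal must ever kill any other animal', 'All animals are equal']
--
--     >>> text2 = "How are you? I'm fine, and you?"
--     >>> get_sentences(text2)
--     ['How are you', "I'm fine, and you"]
--
--     >>> text3 = "How are you? I'm fine, and you? Me too."
--     >>> get_sentences(text3)
--     ['How are you', "I'm fine, and you", 'Me too']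
--     '''
--     #set an empty string sequence and an empty list new_list
--     sequence = ''
--     new_list = []
--     #set a list of special characters
--     special_chars = ['.','!','?']
--     #use for loop to save sequence or append sequence to new_list
--     for i in text:
--         if i not in special_chars:
--             sequence += i
--         else:
--             #remove white characters from sequence
--             sequence = sequence.strip()
--             new_list.append(sequence)
--             #reset sequence as empty string
--             sequence = ''
--     #check special case if last character not in special_chars,then append sequence to new_list
--     if text[-1] not in special_chars:
--         new_list.append(sequence)
--     #return new_list
--     return new_list
--
-- def get_word_breakdown(text):
--     ''' (str) -> list
--     given a string returns a 2D lists of strings.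
--     Each sublist contains a strings representing words from each sentence.
--     >>> text1 = "All the habits of Man are evil. And, above all, no animal must ever tyrannise over his \
--     own kind. Weak or strong, clever or simple, we are all brothers. No animal must ever kill \
--     any other animal. All animals are equal."
--     >>> s = [['all', 'the', 'habits', 'of', 'man', 'are', 'evil'], \
--     ['and', 'above', 'all', 'no', 'animal', 'must', 'ever', 'tyrannise', 'over', 'his', 'own', 'kind'], \
--     ['weak', 'or', 'strong', 'clever', 'or', 'simple', 'we', 'are', 'all', 'brothers'], \
--     ['no', 'animal', 'must', 'ever', 'kill', 'any', 'other', 'animal'], \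
--     ['all', 'animals', 'are', 'equal']]
--     >>> w = get_word_breakdown(text1)
--     >>> s == w
--     True
--
--     >>> text2 = "How are you? I'm fine, and you?"
--     >>> get_word_breakdown(text2)
--     [['how', 'are', 'you'], ['i', 'm', 'fine', 'and', 'you']]
--
--     >>> text3 = "How are you? I'm fine, and you? Me too."
--     >>> get_word_breakdown(text3)
--     [['how', 'are', 'you'], ['i', 'm', 'fine', 'and', 'you'], ['me', 'too']]
--     '''
--     #set word_breakdown as an empty list
--     word_breakdown = []
--     #set skip_chars list for special character
--     skip_chars = [',', '-', '--', ':', ';', '"', "'"]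
--     #set sentence_list as get_sentence(text)
--     sentences_list = get_sentences(text)
--     #use nest for loop to get result
--     for sentence in sentences_list:
--         #lower sentence and remove white characters from sentence
--         sentence = sentence.lower()
--         sentence = sentence.strip()
--         #set sequence as empty list and word as empty string
--         sequence = []
--         word = ''
--         #use this for loop to save word or append word to sequence
--         for i in range(len(sentence)):
--             #check special character
--             if sentence[i] == '\n':
--                 if word == '':
--                     continue
--                 sequence.append(word)
--                 word = ''
--                 continue
--             if sentence[i] not in skip_chars and sentence[i] != ' ':
--                 word += sentence[i]
--             else:
--                 if word == '':
--                     continue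
--                 sequence.append(word)
--                 word = ''
--         #check special case if word not empty,then append word to sequence
--         if word != '':
--             sequence.append(word)
--         #append sequence to word_breakdown to get nest list
--         word_breakdown.append(sequence)
--     #return word_breakdown
--     return word_breakdown
-- ===== SOURCE B (Python) =====
-- def get_word_breakdown(text):
--     # Split into sentence pieces by unifying the three terminators and splitting once.
--     pieces = ''.join('.' if c in '.!?' else c for c in text).split('.')
--     if text[-1] in '.!?':
--         pieces.pop()
--     result = []
--     for piece in pieces:
--         s = piece.lower().strip()
--         flat = ''.join(' ' if c in ' \n,-:;"\'' else c for c in s)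
--         result.append([w for w in flat.split(' ') if w])
--     return result
-- ===== Notes on version B (the rewrite author's own statement) =====
-- stated objective: simpler
-- what changed: A's two hand-rolled character-accumulator loops (one building sentence strings char by char with flush logic, one doing the same for words) are replaced by translate-then-split passes: terminator characters are unified to a single one and the text is split once into sentence pieces, separator characters are unified to a space and each sentence is split once with empty tokens filtered out by a comprehension.
import Mathlib
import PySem

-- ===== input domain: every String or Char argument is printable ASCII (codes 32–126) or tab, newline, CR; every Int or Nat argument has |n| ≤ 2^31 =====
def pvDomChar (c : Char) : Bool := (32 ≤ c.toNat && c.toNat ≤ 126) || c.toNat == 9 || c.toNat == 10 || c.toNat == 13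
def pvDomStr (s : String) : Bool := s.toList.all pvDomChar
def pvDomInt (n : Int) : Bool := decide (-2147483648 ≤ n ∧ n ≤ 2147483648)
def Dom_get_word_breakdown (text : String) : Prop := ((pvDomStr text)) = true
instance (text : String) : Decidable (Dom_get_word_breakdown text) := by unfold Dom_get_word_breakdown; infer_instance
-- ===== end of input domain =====

-- B replaces A's two hand-rolled accumulator scans by translate-then-split passes (simpler); equal return value on every non-empty input.

-- ===== PORT A =====
def pvSpecialChars : List Char := ['.', '!', '?']

-- A's skip_chars is a list of *strings* (it contains "--"); modelled as List (List Char)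
def pvSkipChars : List (List Char) := [[','], ['-'], ['-','-'], [':'], [';'], ['"'], ['\'']]

-- the 'for i in text' loop of get_sentences, state = (sequence, new_list)
def pvSentLoop : List Char → List Char → List (List Char) → List Char × List (List Char)
  | [], seq, acc => (seq, acc)
  | c :: rest, seq, acc =>
      if c ∉ pvSpecialChars then
        pvSentLoop rest (seq ++ [c]) acc
      else
        pvSentLoop rest [] (acc ++ [PySem.Chars.strip seq])

def pyGetSentences (text : List Char) : List (List Char) :=
  let r := pvSentLoop text [] []
  -- text[-1]: IndexError on empty text, excluded by Pre_; default is irrelevant there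
  if PySem.List.pyGetD text (-1) '.' ∉ pvSpecialChars then r.2 ++ [r.1] else r.2

-- the 'for i in range(len(sentence))' loop of get_word_breakdown, state = (word, sequence)
def pvWordLoop : List Char → List Char → List (List Char) → List Char × List (List Char)
  | [], word, seq => (word, seq)
  | c :: rest, word, seq =>
      if c = '\n' then
        if word = [] then pvWordLoop rest word seq
        else pvWordLoop rest [] (seq ++ [word])
      else if [c] ∉ pvSkipChars ∧ c ≠ ' ' then
        pvWordLoop rest (word ++ [c]) seq
      else if word = [] then pvWordLoop rest word seq
      else pvWordLoop rest [] (seq ++ [word])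

def get_word_breakdown (text : String) : List (List String) :=
  (pyGetSentences text.toList).map (fun sentence =>
    let s := PySem.Chars.strip (PySem.Chars.lower sentence)
    let r := pvWordLoop s [] []
    let seq := if r.1 ≠ [] then r.2 ++ [r.1] else r.2
    seq.map (fun w => String.ofList w))

-- ===== PORT B =====
def pvBTerms : List Char := ['.', '!', '?']
def pvBSeps : List Char := [' ', '\n', ',', '-', ':', ';', '"', '\'']

def get_word_breakdown_alt (text : String) : List (List String) :=
  let cs := text.toList
  let pieces0 := PySem.Chars.splitOn (cs.map (fun c => if pvBTerms.contains c then '.' else c)) ['.']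
  -- text[-1]: IndexError on empty text, excluded by Pre_; default is irrelevant there
  let pieces := if pvBTerms.contains (PySem.List.pyGetD cs (-1) ' ') then pieces0.dropLast else pieces0
  pieces.map (fun piece =>
    let s := PySem.Chars.strip (PySem.Chars.lower piece)
    let flat := s.map (fun c => if pvBSeps.contains c then ' ' else c)
    ((PySem.Chars.splitOn flat [' ']).filter (fun w => w ≠ [])).map (fun w => String.ofList w))

-- ===== PRECONDITION & SPEC =====
-- Pre_ excludes exactly the empty string, where A's text[-1] raises IndexError (B's text[-1] raises too).
def Pre_get_word_breakdown (text : String) : Prop := text ≠ ""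
instance (text : String) : Decidable (Pre_get_word_breakdown text) := by unfold Pre_get_word_breakdown; infer_instance
def pvWitness_get_word_breakdown : String := "How are you? I'm fine."

def Spec_get_word_breakdown (text : String) (out : List (List String)) : Prop := out = get_word_breakdown_alt text
instance (text : String) (out : List (List String)) : Decidable (Spec_get_word_breakdown text out) := by unfold Spec_get_word_breakdown; infer_instance

-- ===== CLAIM (what is proved, stated in full; the proofs are below) =====
def Claim_equal_get_word_breakdown : Prop := ∀ (text : String), Dom_get_word_breakdown text → Pre_get_word_breakdown text → Spec_get_word_breakdown text (get_word_breakdown text)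

-- ===== LEMMAS AND PROOFS =====

-- simple recursion computing Python's s.split(sep) for a single-character sep
def pvSplitC (s : Char) : List Char → List (List Char)
  | [] => [[]]
  | c :: cs => if c = s then [] :: pvSplitC s cs
               else (pvSplitC s cs).modifyHead (c :: ·)

theorem pvSplitC_ne_nil (s : Char) (l : List Char) : pvSplitC s l ≠ [] := by
  cases l with
  | nil => simp [pvSplitC]
  | cons c cs =>
      simp only [pvSplitC]
      split
      · simp
      · cases h : pvSplitC s cs with
        | nil => exact absurd h (pvSplitC_ne_nil s cs)
        | cons a as => simp [List.modifyHead]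

theorem pvModifyHead_modifyHead {α : Type} (l : List α) (f g : α → α) :
    (l.modifyHead g).modifyHead f = l.modifyHead (fun x => f (g x)) := by
  cases l <;> simp [List.modifyHead]

theorem pvGo_singleton (s : Char) :
    ∀ (fuel : Nat) (l cur : List Char) (acc : List (List Char)), l.length ≤ fuel →
      PySem.Chars.splitOn.go [s] fuel l cur acc
        = acc.reverse ++ (pvSplitC s l).modifyHead (cur.reverse ++ ·) := by
  intro fuel
  induction fuel with
  | zero =>
    intro l cur acc hl
    have hnil : l = [] := List.eq_nil_of_length_eq_zero (Nat.le_zero.mp hl)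
    subst hnil
    simp [PySem.Chars.splitOn.go, pvSplitC, List.modifyHead]
  | succ n ih =>
    intro l cur acc hl
    cases l with
    | nil => simp [PySem.Chars.splitOn.go, pvSplitC, List.modifyHead]
    | cons c rest =>
      rw [PySem.Chars.splitOn.go]
      simp only [List.length_cons] at hl
      by_cases hc : c = s
      · subst hc
        have hpre : [c].isPrefixOf (c :: rest) = true := by simp [List.isPrefixOf]
        rw [if_pos hpre]
        have hd : List.drop [c].length (c :: rest) = rest := rfl
        rw [hd, ih _ _ _ (by omega)]
        simp [pvSplitC, List.modifyHead]
        cases pvSplitC c rest <;> rfl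
      · have hpre : ¬ ([s].isPrefixOf (c :: rest) = true) := by
          simp [List.isPrefixOf]
          intro h; exact absurd h.symm hc
        rw [if_neg hpre]
        rw [ih _ _ _ (by omega)]
        simp only [pvSplitC, if_neg hc, pvModifyHead_modifyHead]
        congr 1
        cases pvSplitC s rest with
        | nil => rfl
        | cons a as => simp [List.modifyHead]

theorem pvSplitOn_singleton (s : Char) (l : List Char) :
    PySem.Chars.splitOn l [s] = pvSplitC s l := by
  rw [PySem.Chars.splitOn, pvGo_singleton s (l.length + 1) l [] [] (by omega)]
  cases pvSplitC s l with
  | nil => rfl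
  | cons a as => simp [List.modifyHead]

theorem pv_isspace_lowerChar (c : Char) :
    PySem.Chars.isspace (PySem.Chars.lowerChar c) = PySem.Chars.isspace c := by
  unfold PySem.Chars.lowerChar PySem.Chars.isupper
  split
  · rename_i h
    simp only [decide_eq_true_eq, Bool.and_eq_true] at h
    have h1 : 65 ≤ c.toNat := h.1
    have h2 : c.toNat ≤ 90 := h.2
    have hv : (Char.ofNat (c.toNat + 32)).toNat = c.toNat + 32 := by
      have hval : Nat.isValidChar (c.toNat + 32) := Or.inl (by omega)
      rw [Char.ofNat, dif_pos hval]
      exact Char.toNat_ofNatAux hval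
    simp only [PySem.Chars.isspace, hv]
    rw [Bool.eq_iff_iff]
    simp only [Bool.or_eq_true, Bool.and_eq_true, decide_eq_true_eq]
    omega
  · rfl

theorem pv_lower_strip (x : List Char) :
    PySem.Chars.strip (PySem.Chars.lower x) = PySem.Chars.lower (PySem.Chars.strip x) := by
  have hcomp : (PySem.Chars.isspace ∘ PySem.Chars.lowerChar) = PySem.Chars.isspace := by
    funext c; exact pv_isspace_lowerChar c
  unfold PySem.Chars.strip PySem.Chars.rstrip PySem.Chars.lstrip PySem.Chars.lower
  rw [List.dropWhile_map, hcomp, ← List.map_reverse, List.dropWhile_map, hcomp, List.map_reverse]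

theorem pv_strip_strip (x : List Char) :
    PySem.Chars.strip (PySem.Chars.strip x) = PySem.Chars.strip x := by
  unfold PySem.Chars.strip PySem.Chars.rstrip PySem.Chars.lstrip
  set p := PySem.Chars.isspace with hp
  set y := List.dropWhile p x with hy
  have hyy : List.dropWhile p y = y := List.dropWhile_idempotent p x
  set z := (List.dropWhile p y.reverse).reverse with hz
  have hpre : z <+: y := by
    have h1 : List.dropWhile p y.reverse <:+ y.reverse := List.dropWhile_suffix p
    have h2 := List.reverse_prefix.mpr h1
    rw [List.reverse_reverse] at h2
    exact h2
  have hzy : List.dropWhile p z = z := by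
    rw [List.dropWhile_eq_self_iff]
    intro hl
    have hyl : 0 < y.length := Nat.lt_of_lt_of_le hl (List.IsPrefix.length_le hpre)
    rw [hpre.getElem hl]
    exact List.dropWhile_eq_self_iff.mp hyy hyl
  rw [hzy, hz, List.reverse_reverse, List.dropWhile_idempotent]

theorem pv_term_iff (c : Char) : pvBTerms.contains c = true ↔ c ∈ pvSpecialChars := by
  simp [pvBTerms, pvSpecialChars]

theorem pv_sep_iff (c : Char) : pvBSeps.contains c = true ↔ (c = '\n' ∨ [c] ∈ pvSkipChars ∨ c = ' ') := by
  simp [pvBSeps, pvSkipChars]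
  tauto

theorem pvModifyHead_nil {α : Type} (S : List (List α)) : S.modifyHead (fun x => ([] : List α) ++ x) = S := by
  cases S <;> simp [List.modifyHead]

theorem pvLast (cs : List Char) (d : Char) (h : cs ≠ []) : PySem.List.pyGetD cs (-1) d = cs.getLast h := by
  have hl : 0 < cs.length := List.length_pos_iff.mpr h
  simp only [PySem.List.pyGetD, PySem.List.pyGet?, PySem.List.pyIdx?]
  rw [if_neg (by omega), if_pos (by exact_mod_cast by omega : (-(cs.length:Int) ≤ -1))]
  have hk : (-(-1:Int)).toNat = 1 := rfl
  rw [hk]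
  simp only [Option.bind]
  rw [List.getElem?_eq_getElem (by omega)]
  simp [List.getLast_eq_getElem]

-- sentence-level loop characterisation
theorem pvSentLoop_eq (cs : List Char) : ∀ (seq : List Char) (acc : List (List Char)),
    pvSentLoop cs seq acc =
      (((pvSplitC '.' (cs.map (fun c => if pvBTerms.contains c then '.' else c))).modifyHead (seq ++ ·)).getLastD [],
       acc ++ (((pvSplitC '.' (cs.map (fun c => if pvBTerms.contains c then '.' else c))).modifyHead (seq ++ ·)).dropLast).map PySem.Chars.strip) := by
  induction cs with
  | nil => intro seq acc; simp [pvSentLoop, pvSplitC, List.modifyHead]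
  | cons c cs ih =>
    intro seq acc
    simp only [List.map_cons, pvSentLoop]
    by_cases hc : c ∈ pvSpecialChars
    · rw [if_neg (by simpa using hc), ih [] _]
      rw [if_pos ((pv_term_iff c).mpr hc)]
      simp only [pvSplitC]
      cases hT : pvSplitC '.' (List.map (fun c => if pvBTerms.contains c then '.' else c) cs) with
      | nil => exact absurd hT (pvSplitC_ne_nil _ _)
      | cons a as => simp [List.modifyHead]
    · rw [if_pos (by simpa using hc), ih (seq ++ [c]) _]
      have hne : c ≠ '.' := by intro h; exact hc (h ▸ (by simp [pvSpecialChars]))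
      rw [if_neg (fun h => hc ((pv_term_iff c).mp h))]
      simp only [pvSplitC, if_neg hne]
      cases hT : pvSplitC '.' (List.map (fun c => if pvBTerms.contains c then '.' else c) cs) with
      | nil => exact absurd hT (pvSplitC_ne_nil _ _)
      | cons a as => simp [List.modifyHead]

-- word-level loop characterisation
theorem pvWordLoop_eq (cs : List Char) : ∀ (word : List Char) (seq : List (List Char)),
    (let r := pvWordLoop cs word seq; if r.1 ≠ [] then r.2 ++ [r.1] else r.2)
      = seq ++ ((pvSplitC ' ' (cs.map (fun c => if pvBSeps.contains c then ' ' else c))).modifyHead (word ++ ·)).filter (fun w => w ≠ []) := by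
  induction cs with
  | nil =>
    intro word seq
    by_cases hw : word = [] <;> simp [pvWordLoop, pvSplitC, List.modifyHead, hw]
  | cons c cs ih =>
    intro word seq
    simp only [List.map_cons]
    by_cases hsep : pvBSeps.contains c = true
    · rw [if_pos hsep]
      simp only [pvSplitC]
      have hstep : pvWordLoop (c :: cs) word seq
          = if word = [] then pvWordLoop cs word seq else pvWordLoop cs [] (seq ++ [word]) := by
        rcases (pv_sep_iff c).mp hsep with h | h | h
        · simp [pvWordLoop, h]
        · have hno : ¬ ([c] ∉ pvSkipChars ∧ c ≠ ' ') := by tauto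
          by_cases hnl : c = '\n'
          · simp [pvWordLoop, hnl]
          · simp [pvWordLoop, hnl, hno]
        · subst h
          simp [pvWordLoop, pvSkipChars]
      by_cases hw : word = []
      · subst hw
        rw [hstep, if_pos rfl, ih [] seq]
        cases hT : pvSplitC ' ' (List.map (fun c => if pvBSeps.contains c then ' ' else c) cs) with
        | nil => exact absurd hT (pvSplitC_ne_nil _ _)
        | cons a as => simp [List.modifyHead]
      · rw [hstep, if_neg hw, ih [] (seq ++ [word])]
        cases hT : pvSplitC ' ' (List.map (fun c => if pvBSeps.contains c then ' ' else c) cs) with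
        | nil => exact absurd hT (pvSplitC_ne_nil _ _)
        | cons a as => simp [List.modifyHead, hw]
    · have h3 := hsep
      rw [pv_sep_iff] at h3
      push Not at h3
      obtain ⟨hnl, hskip, hsp⟩ := h3
      rw [if_neg hsep]
      have hstep : pvWordLoop (c :: cs) word seq = pvWordLoop cs (word ++ [c]) seq := by
        simp [pvWordLoop, hnl, hskip, hsp]
      rw [hstep, ih (word ++ [c]) seq]
      simp only [pvSplitC, if_neg hsp]
      cases hT : pvSplitC ' ' (List.map (fun c => if pvBSeps.contains c then ' ' else c) cs) with
      | nil => exact absurd hT (pvSplitC_ne_nil _ _)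
      | cons a as => simp [List.modifyHead]

theorem pv_s_strip (x : List Char) :
    PySem.Chars.strip (PySem.Chars.lower (PySem.Chars.strip x)) = PySem.Chars.strip (PySem.Chars.lower x) := by
  rw [pv_lower_strip, pv_strip_strip, ← pv_lower_strip]

-- A's per-sentence body equals B's per-piece body
theorem pv_piece_eq (x : List Char) :
    (let s := PySem.Chars.strip (PySem.Chars.lower x)
     let r := pvWordLoop s [] []
     let seq := if r.1 ≠ [] then r.2 ++ [r.1] else r.2
     seq.map (fun w => String.ofList w))
    = (let s := PySem.Chars.strip (PySem.Chars.lower x)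
       let flat := s.map (fun c => if pvBSeps.contains c then ' ' else c)
       ((PySem.Chars.splitOn flat [' ']).filter (fun w => w ≠ [])).map (fun w => String.ofList w)) := by
  have h := pvWordLoop_eq (PySem.Chars.strip (PySem.Chars.lower x)) [] []
  simp only [] at h ⊢
  rw [h, pvModifyHead_nil, pvSplitOn_singleton]
  simp

-- ===== VERDICT (by name: the statement is the Claim_ definition above) =====
theorem get_word_breakdown_spec : Claim_equal_get_word_breakdown := by
  intro text _hdom hpre
  have hne : text.toList ≠ [] := by
    intro h
    exact hpre (by simpa using congrArg String.ofList h)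
  unfold Spec_get_word_breakdown get_word_breakdown get_word_breakdown_alt pyGetSentences
  simp only []
  rw [pvSentLoop_eq, pvModifyHead_nil, pvSplitOn_singleton, pvLast _ '.' hne, pvLast _ ' ' hne]
  dsimp only
  simp only [List.nil_append]
  by_cases hL : pvBTerms.contains (text.toList.getLast hne) = true
  · rw [if_neg (not_not_intro ((pv_term_iff _).mp hL)), if_pos hL]
    rw [List.map_map]
    apply List.map_congr_left
    intro x _
    simp only [Function.comp]
    exact (pv_piece_eq (PySem.Chars.strip x)).trans (by rw [pv_s_strip x])
  · rw [if_pos (fun hmem => hL ((pv_term_iff _).mpr hmem)), if_neg hL]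
    have hS := pvSplitC_ne_nil '.' (text.toList.map (fun c => if pvBTerms.contains c then '.' else c))
    conv_rhs => rw [← List.dropLast_append_getLast hS]
    rw [List.map_append, List.map_append]
    congr 1
    · rw [List.map_map]
      apply List.map_congr_left
      intro x _
      simp only [Function.comp]
      exact (pv_piece_eq (PySem.Chars.strip x)).trans (by rw [pv_s_strip x])
    · simp only [List.map]
      rw [List.getLastD_eq_getLast?, List.getLast?_eq_some_getLast hS]
      simp only [Option.getD_some]
      exact congrArg (fun y => [y]) (pv_piece_eq _)
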